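-- pv_equiv track=rewrite | github.com/liran906/DSA | others/01_The Chinese nth Auspicious Number.py | nthAuspiciousNum
-- ===== SOURCE A (Python) =====
-- def nthAuspiciousNum(n):
--     result = ''
--     while n > 0:
--         # 将 n-1 看作是“吉利二进制树”中的索引（从0开始）
--         # 如果当前是奇数位置，说明它是某个父节点的左子（编码为 '8'）
--         # 如果当前是偶数位置，说明它是右子（编码为 '9'）
--         if n % 2 == 1:
--             result = '8' + result
--         else:
--             result = '9' + result
--         # 进入上一层节点（向上移动树的层级）
--         n = (n - 1) // 2
--     # 将构造出的字符串转为整数返回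
--     return int(result)
-- ===== SOURCE B (Python) =====
-- def nthAuspiciousNum(n):
--     # Binary representation of n+1 with the leading bit dropped, digits remapped 0->'8', 1->'9'.
--     return int(format(n + 1, 'b')[1:].translate(str.maketrans('01', '89')))
-- ===== Notes on version B (the rewrite author's own statement) =====
-- stated objective: idiomatic
-- what changed: B replaces A's digit-building halving loop (n=(n-1)//2, prepending '8'/'9' into a string) by a loop-free one-liner: format n+1 in binary with the built-in, drop the leading bit, and remap '0'/'1' to '8'/'9' via str.translate before int().
import Mathlib
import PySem

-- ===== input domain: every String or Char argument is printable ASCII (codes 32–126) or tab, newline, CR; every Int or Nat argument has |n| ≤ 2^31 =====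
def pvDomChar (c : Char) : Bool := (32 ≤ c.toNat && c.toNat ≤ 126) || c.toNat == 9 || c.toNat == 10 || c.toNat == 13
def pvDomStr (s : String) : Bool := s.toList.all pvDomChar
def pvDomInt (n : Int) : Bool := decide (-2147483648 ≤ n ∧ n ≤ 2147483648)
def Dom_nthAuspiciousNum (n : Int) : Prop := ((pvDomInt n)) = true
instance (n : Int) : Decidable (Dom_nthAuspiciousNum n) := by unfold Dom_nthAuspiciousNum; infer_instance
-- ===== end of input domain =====

-- B replaces A's digit-building halving loop by the built-in binary formatting of n+1 with the
-- leading bit dropped and '0'/'1' remapped to '8'/'9' (idiomatic, loop-free in Python).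

-- ===== PORT A =====
-- A's while-loop: prepends '8'/'9' to result, then n = (n-1)//2.
def auspLoopA (n : Int) (result : List Char) : List Char :=
  if 0 < n then
    auspLoopA (PySem.Int.floordiv (n - 1) 2)
      ((if PySem.Int.mod n 2 == 1 then '8' else '9') :: result)
  else result
termination_by n.toNat
decreasing_by
  rename_i h
  rw [PySem.Int.floordiv_eq_ediv_of_pos (by omega)]
  omega

def nthAuspiciousNum (n : Int) : Int :=
  (PySem.Int.ofChars? (auspLoopA n [])).getD 0   -- int(result); Pre_ excludes n ≤ 0 where int('') raises

-- ===== PORT B =====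
-- str.translate with the table str.maketrans('01','89'): a 1-char→1-char map, ported exactly as a map.
def translate89 (c : Char) : Char := if c = '0' then '8' else if c = '1' then '9' else c

def nthAuspiciousNum_alt (n : Int) : Int :=
  -- int(format(n+1,'b')[1:].translate(str.maketrans('01','89')))
  (PySem.Int.ofStr? (String.ofList
    ((PySem.Str.slice (PySem.Int.toBin (n + 1)) (some 1) none).toList.map translate89))).getD 0

-- ===== PRECONDITION & SPEC =====
-- On n ≤ 0 both programs raise ValueError (A: int(''); B: int of '' or of a non-digit string).
def Pre_nthAuspiciousNum (n : Int) : Prop := 0 < n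
instance (n : Int) : Decidable (Pre_nthAuspiciousNum n) := by unfold Pre_nthAuspiciousNum; infer_instance
def pvWitness_nthAuspiciousNum : Int := 5

def Spec_nthAuspiciousNum (n : Int) (out : Int) : Prop := out = nthAuspiciousNum_alt n
instance (n : Int) (out : Int) : Decidable (Spec_nthAuspiciousNum n out) := by unfold Spec_nthAuspiciousNum; infer_instance

-- ===== CLAIM (what is proved, stated in full; the proofs are below) =====
def Claim_equal_nthAuspiciousNum : Prop := ∀ (n : Int), Dom_nthAuspiciousNum n → Pre_nthAuspiciousNum n → Spec_nthAuspiciousNum n (nthAuspiciousNum n)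

-- ===== LEMMAS AND PROOFS =====

-- Big-endian binary digits of n (proof-side characterisation of Nat.toDigits 2).
def bitsChars (n : Nat) : List Char :=
  if h : n < 2 then [Nat.digitChar n]
  else bitsChars (n / 2) ++ [Nat.digitChar (n % 2)]
termination_by n
decreasing_by omega

theorem bitsChars_ne_nil (n : Nat) : bitsChars n ≠ [] := by
  rw [bitsChars]
  split
  · simp
  · simp

theorem toDigitsCore_eq (f : Nat) : ∀ (n : Nat) (acc : List Char), n < f →
    Nat.toDigitsCore 2 f n acc = bitsChars n ++ acc := by
  induction f with
  | zero => intro n acc h; omega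
  | succ f ih =>
    intro n acc h
    rw [Nat.toDigitsCore]
    by_cases h2 : n / 2 = 0
    · have : n < 2 := by omega
      simp only [h2]
      rw [bitsChars, dif_pos this, Nat.mod_eq_of_lt this]
      simp
    · rw [if_neg h2]
      conv_rhs => rw [bitsChars]
      rw [dif_neg (by omega), ih (n / 2) _ (by omega)]
      simp

theorem toDigits_eq (n : Nat) : Nat.toDigits 2 n = bitsChars n := by
  have := toDigitsCore_eq (n + 1) n [] (by omega)
  simpa [Nat.toDigits] using this

-- A's loop appends its accumulator on the right.
theorem auspLoopA_acc (k : Nat) : ∀ (n : Int), n.toNat = k → ∀ result,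
    auspLoopA n result = auspLoopA n [] ++ result := by
  induction k using Nat.strong_induction_on with
  | _ k ih =>
    intro n hk result
    by_cases h : 0 < n
    · have hd : PySem.Int.floordiv (n - 1) 2 = (n - 1) / 2 :=
        PySem.Int.floordiv_eq_ediv_of_pos (by omega)
      have hlt : ((n - 1) / 2).toNat < k := by omega
      conv_lhs => rw [auspLoopA]
      conv_rhs => rw [auspLoopA]
      rw [if_pos h, if_pos h, hd,
        ih _ hlt _ rfl ((if PySem.Int.mod n 2 == 1 then '8' else '9') :: result),
        ih _ hlt _ rfl [if PySem.Int.mod n 2 == 1 then '8' else '9']]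
      simp
    · conv_lhs => rw [auspLoopA]
      conv_rhs => rw [auspLoopA]
      rw [if_neg h, if_neg h]; simp

-- A's string is the binary of n+1 without the leading bit, bits remapped 0→'8'/1→'9'.
theorem loopA_eq_bits (k : Nat) : ∀ (n : Int), n.toNat = k → 0 ≤ n →
    auspLoopA n [] = (bitsChars (n + 1).toNat).tail.map translate89 := by
  induction k using Nat.strong_induction_on with
  | _ k ih =>
    intro n hk hn
    by_cases h : 0 < n
    · have hdA : PySem.Int.floordiv (n - 1) 2 = (n - 1) / 2 :=
        PySem.Int.floordiv_eq_ediv_of_pos (by omega)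
      have hmA : PySem.Int.mod n 2 = n % 2 :=
        PySem.Int.mod_eq_emod_of_pos (by omega)
      have hlt : ((n - 1) / 2).toNat < k := by omega
      have hA : auspLoopA n [] =
          auspLoopA ((n - 1) / 2) [] ++ [if PySem.Int.mod n 2 == 1 then '8' else '9'] := by
        conv_lhs => rw [auspLoopA]
        rw [if_pos h, hdA, auspLoopA_acc (((n - 1) / 2).toNat) _ rfl]
      have hm2 : ¬ ((n + 1).toNat < 2) := by omega
      have hhalf : ((n + 1).toNat) / 2 = ((n - 1) / 2 + 1).toNat := by omega
      rw [hA, ih _ hlt _ rfl (by omega)]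
      conv_rhs => rw [bitsChars, dif_neg hm2]
      rw [List.tail_append_of_ne_nil (bitsChars_ne_nil _), hhalf]
      rw [List.map_append]
      congr 1
      have h2 : n % 2 = 0 ∨ n % 2 = 1 := by omega
      rcases h2 with h2 | h2 <;>
        simp [h2, show (n + 1).toNat % 2 = (1 - n % 2).toNat by omega,
          Nat.digitChar, translate89]
    · have hn0 : n = 0 := by omega
      subst hn0
      rw [auspLoopA, if_neg (by omega)]
      have hb1 : bitsChars 1 = ['1'] := by rw [bitsChars, dif_pos (by omega)]; rfl
      have h1 : ((0:Int) + 1).toNat = 1 := rfl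
      rw [h1, hb1]
      simp

-- ===== VERDICT (by name: the statement is the Claim_ definition above) =====
theorem nthAuspiciousNum_spec : Claim_equal_nthAuspiciousNum := by
  intro n _ hpre
  have hn : 0 < n := hpre
  unfold Spec_nthAuspiciousNum nthAuspiciousNum nthAuspiciousNum_alt
  rw [PySem.Int.ofStr?_ofList, PySem.Str.toList_slice, PySem.Int.toList_toBin]
  have hbin : PySem.Int.toBinChars (n + 1) = bitsChars (n + 1).toNat := by
    rw [PySem.Int.toBinChars, if_neg (by omega), toDigits_eq]
  rw [hbin]
  rw [show ∀ (xs : List Char) a b, PySem.Chars.slice xs a b = PySem.List.slice xs a b from fun _ _ _ => rfl,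
    PySem.List.slice_from_one, loopA_eq_bits n.toNat n rfl (le_of_lt hn)]
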